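-- pv_equiv track=rewrite | github.com/YJX-01/CIS6200-final | stability.py | generate_split
-- ===== SOURCE A (Python) =====
-- from typing import List, Tuple, Set, Optional, Dict
-- from itertools import combinations
--
-- def generate_split(
--
--     coalition: Set[int]
-- ) -> List[Tuple[Set[int], Set[int]]]:
--     """
--     Generate all possible binary splits of a coalition.
--
--     Args:
--         coalition: Coalition to split
--
--     Returns:
--         List of (subset_a, subset_b) pairs
--     """
--     if len(coalition) <= 1:
--         return []
--
--     splits = []
--     coalition_list = sorted(list(coalition))
--
--     # Generate all non-empty proper subsets
--     for size in range(1, len(coalition_list)):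
--         for subset_a_tuple in combinations(coalition_list, size):
--             subset_a = set(subset_a_tuple)
--             subset_b = coalition - subset_a
--
--             # Avoid duplicates (only include one ordering)
--             if min(subset_a) < min(subset_b):
--                 splits.append((subset_a, subset_b))
--
--     return splits
-- ===== SOURCE B (Python) =====
-- from itertools import combinations
--
-- def generate_split(coalition):
--     if len(coalition) <= 1:
--         return []
--     ordered = sorted(coalition)
--     m, rest = ordered[0], ordered[1:]
--     splits = []
--     # min(subset_a) < min(subset_b) holds exactly when subset_a contains the
--     # global minimum m and subset_b is non-empty, so enumerate only the
--     # combinations of the remaining elements that join m.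
--     for k in range(len(rest)):
--         for combo in combinations(rest, k):
--             subset_a = {m} | set(combo)
--             splits.append((subset_a, coalition - subset_a))
--     return splits
-- ===== Notes on version B (the rewrite author's own statement) =====
-- stated objective: simpler
-- what changed: Instead of enumerating all subsets and filtering by min(subset_a) < min(subset_b), B anchors subset_a on the coalition's minimum and enumerates only combinations of the remaining elements, so the min-comparison filter disappears.
import Mathlib
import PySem

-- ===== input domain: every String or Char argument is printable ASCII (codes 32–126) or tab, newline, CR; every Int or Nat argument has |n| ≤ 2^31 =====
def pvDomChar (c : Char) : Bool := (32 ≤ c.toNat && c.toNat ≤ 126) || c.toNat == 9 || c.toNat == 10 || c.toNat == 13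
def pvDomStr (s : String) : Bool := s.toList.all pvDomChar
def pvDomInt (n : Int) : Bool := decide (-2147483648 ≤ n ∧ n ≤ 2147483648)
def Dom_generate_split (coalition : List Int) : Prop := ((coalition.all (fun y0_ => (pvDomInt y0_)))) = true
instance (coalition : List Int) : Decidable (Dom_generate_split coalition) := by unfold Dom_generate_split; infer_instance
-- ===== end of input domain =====

-- B anchors subset_a on the coalition's minimum and enumerates only combinations of the
-- remaining elements, so A's min-comparison filter disappears (objective: simpler).

-- ===== PORT A =====
-- the body of A's inner loop: subset_a/subset_b and the min-filter; Python's min()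
-- raises ValueError on an empty set — the none branches are exactly those raising
-- inputs, excluded by Pre_generate_split
def pvBodyA (coalition : List Int) (splits : List (List Int × List Int))
    (subset_a_tuple : List Int) : List (List Int × List Int) :=
  let subset_a := PySem.Set.ofList subset_a_tuple
  let subset_b := PySem.Set.diff coalition subset_a
  match PySem.List.min? subset_a (fun x => x), PySem.List.min? subset_b (fun x => x) with
  | some ma, some mb => if ma < mb then splits ++ [(subset_a, subset_b)] else splits
  | _, _ => splits

def generate_split (coalition : List Int) : List (List Int × List Int) :=
  if coalition.length ≤ 1 then []
  else
    let coalition_list := PySem.List.sorted coalition (fun x => x) false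
    (PySem.List.pyRange 1 (coalition_list.length : Int)).foldl (fun splits size =>
      (PySem.List.combinations coalition_list size.toNat).foldl (pvBodyA coalition) splits) []

-- ===== PORT B =====
-- the body of B's inner loop: subset_a = {m} | set(combo), appended unconditionally
def pvBodyB (coalition : List Int) (m : Int) (splits : List (List Int × List Int))
    (combo : List Int) : List (List Int × List Int) :=
  let subset_a := PySem.Set.union (PySem.Set.ofList [m]) (PySem.Set.ofList combo)
  splits ++ [(subset_a, PySem.Set.diff coalition subset_a)]

def generate_split_alt (coalition : List Int) : List (List Int × List Int) :=
  if coalition.length ≤ 1 then []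
  else
    match PySem.List.sorted coalition (fun x => x) false with
    | [] => []  -- unreachable: the sorted list has the coalition's length ≥ 2
    | m :: rest =>
      (PySem.List.pyRange 0 (rest.length : Int)).foldl (fun splits k =>
        (PySem.List.combinations rest k.toNat).foldl (pvBodyB coalition m) splits) []

-- ===== PRECONDITION & SPEC =====
-- coalition is a Python set: under the type convention its List port holds DISTINCT
-- elements, so Pre_ requires exactly that (a duplicate-carrying list corresponds to no
-- Python input of A, and on one the ported min-of-empty branch would be reached).
def Pre_generate_split (coalition : List Int) : Prop := coalition.Nodup
instance (coalition : List Int) : Decidable (Pre_generate_split coalition) := by unfold Pre_generate_split; infer_instance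
def pvWitness_generate_split : List Int := [3, 1, 2]

def Spec_generate_split (coalition : List Int) (out : List (List Int × List Int)) : Prop := out = generate_split_alt coalition
instance (coalition : List Int) (out : List (List Int × List Int)) : Decidable (Spec_generate_split coalition out) := by unfold Spec_generate_split; infer_instance

-- ===== CLAIM =====
def Claim_equal_generate_split : Prop := ∀ (coalition : List Int), Dom_generate_split coalition → Pre_generate_split coalition → Spec_generate_split coalition (generate_split coalition)

-- ===== LEMMAS AND PROOFS =====

lemma pv_foldl_const {α β : Type} (l : List α) (init : β) :
    l.foldl (fun acc _ => acc) init = init := by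
  induction l with
  | nil => rfl
  | cons x t ih => exact ih

-- A's body keeps the split when the tuple starts with the global minimum m
lemma pv_bodyA_keep (coalition : List Int) (m : Int) (rest : List Int)
    (hm : ∀ x ∈ rest, m < x) (hrest : rest.Nodup)
    (hperm : (m :: rest).Perm coalition) (hnd : coalition.Nodup)
    (c : List Int) (hcs : c.Sublist rest) (hlt : c.length < rest.length)
    (splits : List (List Int × List Int)) :
    pvBodyA coalition splits (m :: c)
      = splits ++ [(m :: c, PySem.Set.diff coalition (m :: c))] := by
  have hcm : ∀ x ∈ c, m < x := fun x hx => hm x (hcs.subset hx)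
  have hmc : m ∉ c := fun h => lt_irrefl m (hcm m h)
  have hcnd : c.Nodup := hrest.sublist hcs
  have hnodup : (m :: c).Nodup := List.nodup_cons.mpr ⟨hmc, hcnd⟩
  have hof : PySem.Set.ofList (m :: c) = m :: c := PySem.Set.ofList_eq_self_of_nodup _ hnodup
  have hminA : PySem.List.min? (m :: c) (fun x => x) = some m := by
    rw [PySem.List.min?_id_cons]
    have hfold : List.foldl min m c = m := by
      rcases PySem.List.foldl_min_mem c m with h | h
      · exact h
      · have h1 := (PySem.List.foldl_min_le c m).1
        have h2 := hcm _ h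
        omega
    rw [hfold]
  have hbne : ∃ x, x ∈ PySem.Set.diff coalition (m :: c) := by
    by_contra hall
    have hsub : coalition ⊆ m :: c := by
      intro x hx
      by_contra hxn
      exact hall ⟨x, (PySem.Set.mem_diff coalition (m :: c) x).mpr ⟨hx, hxn⟩⟩
    have h1 := (List.subperm_of_subset hnd hsub).length_le
    have h2 := hperm.length_eq
    simp only [List.length_cons] at h1 h2
    omega
  obtain ⟨mb, hmb⟩ : ∃ mb, PySem.List.min? (PySem.Set.diff coalition (m :: c)) (fun x => x) = some mb := by
    cases h : PySem.List.min? (PySem.Set.diff coalition (m :: c)) (fun x => x) with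
    | none =>
        rw [PySem.List.min?_eq_none_iff] at h
        rcases hbne with ⟨x, hx⟩
        rw [h] at hx
        simp at hx
    | some mb => exact ⟨mb, rfl⟩
  have hmbmem := (PySem.Set.mem_diff coalition (m :: c) mb).mp (PySem.List.min?_mem hmb)
  have hmgt : m < mb := by
    rcases List.mem_cons.mp (hperm.mem_iff.mpr hmbmem.1) with h | h
    · subst h
      exact absurd (List.mem_cons_self ..) hmbmem.2
    · exact hm mb h
  simp only [pvBodyA, hof, hminA, hmb]
  rw [if_pos hmgt]

-- A's body skips tuples that avoid the global minimum m
lemma pv_bodyA_skip (coalition : List Int) (m : Int) (rest : List Int)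
    (hm : ∀ x ∈ rest, m < x) (hrest : rest.Nodup)
    (hperm : (m :: rest).Perm coalition)
    (tup : List Int) (hcs : tup.Sublist rest) (hne : tup ≠ [])
    (splits : List (List Int × List Int)) :
    pvBodyA coalition splits tup = splits := by
  have htm : ∀ x ∈ tup, m < x := fun x hx => hm x (hcs.subset hx)
  have hmt : m ∉ tup := fun h => lt_irrefl m (htm m h)
  have hof : PySem.Set.ofList tup = tup :=
    PySem.Set.ofList_eq_self_of_nodup _ (hrest.sublist hcs)
  obtain ⟨ma, hma⟩ : ∃ ma, PySem.List.min? tup (fun x => x) = some ma := by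
    cases h : PySem.List.min? tup (fun x => x) with
    | none => exact absurd ((PySem.List.min?_eq_none_iff _ _).mp h) hne
    | some ma => exact ⟨ma, rfl⟩
  have hma_gt : m < ma := htm ma (PySem.List.min?_mem hma)
  have hmB : m ∈ PySem.Set.diff coalition tup :=
    (PySem.Set.mem_diff coalition tup m).mpr ⟨hperm.mem_iff.mp (List.mem_cons_self ..), hmt⟩
  obtain ⟨mb, hmb⟩ : ∃ mb, PySem.List.min? (PySem.Set.diff coalition tup) (fun x => x) = some mb := by
    cases h : PySem.List.min? (PySem.Set.diff coalition tup) (fun x => x) with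
    | none =>
        rw [PySem.List.min?_eq_none_iff] at h
        rw [h] at hmB
        simp at hmB
    | some mb => exact ⟨mb, rfl⟩
  have hmb_le : mb ≤ m := PySem.List.min?_isMin hmb m hmB
  simp only [pvBodyA, hof, hma, hmb]
  rw [if_neg (by omega)]

-- A's inner loop at size s+1 produces exactly the m-anchored splits of size s+1
lemma pv_innerA (coalition : List Int) (m : Int) (rest : List Int)
    (hm : ∀ x ∈ rest, m < x) (hrest : rest.Nodup)
    (hperm : (m :: rest).Perm coalition) (hnd : coalition.Nodup)
    (s : Nat) (hs : s + 1 ≤ rest.length) (splits : List (List Int × List Int)) :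
    (PySem.List.combinations (m :: rest) (s + 1)).foldl (pvBodyA coalition) splits
      = splits ++ (PySem.List.combinations rest s).map
          (fun c => (m :: c, PySem.Set.diff coalition (m :: c))) := by
  have hkeep : (PySem.List.combinations rest s).foldl
      (fun acc c => pvBodyA coalition acc (m :: c)) splits
      = (PySem.List.combinations rest s).foldl
      (fun acc c => acc ++ [(m :: c, PySem.Set.diff coalition (m :: c))]) splits :=
    PySem.List.foldl_congr_mem (PySem.List.combinations rest s)
      (fun acc c => pvBodyA coalition acc (m :: c))
      (fun acc c => acc ++ [(m :: c, PySem.Set.diff coalition (m :: c))]) splits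
      (fun acc c hc => by
        obtain ⟨hsub, hlen⟩ := (PySem.List.mem_combinations_iff _ _ _).mp hc
        exact pv_bodyA_keep coalition m rest hm hrest hperm hnd c hsub
          (by rw [hlen]; omega) acc)
  have hskip : ∀ init : List (List Int × List Int),
      (PySem.List.combinations rest (s + 1)).foldl (pvBodyA coalition) init = init := fun init => by
    rw [PySem.List.foldl_congr_mem (PySem.List.combinations rest (s + 1))
      (pvBodyA coalition) (fun acc _ => acc) init
      (fun acc tup htup => by
        obtain ⟨hsub, hlen⟩ := (PySem.List.mem_combinations_iff _ _ _).mp htup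
        exact pv_bodyA_skip coalition m rest hm hrest hperm tup hsub
          (by intro h; rw [h] at hlen; simp at hlen) acc)]
    exact pv_foldl_const _ _
  rw [PySem.List.combinations_cons_succ, List.foldl_append, List.foldl_map, hkeep,
    PySem.List.foldl_append_singleton_eq_map, hskip]

-- B's inner loop at size k produces exactly the m-anchored splits of size k+1
lemma pv_innerB (coalition : List Int) (m : Int) (rest : List Int)
    (hm : ∀ x ∈ rest, m < x) (hrest : rest.Nodup)
    (k : Nat) (splits : List (List Int × List Int)) :
    (PySem.List.combinations rest k).foldl (pvBodyB coalition m) splits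
      = splits ++ (PySem.List.combinations rest k).map
          (fun c => (m :: c, PySem.Set.diff coalition (m :: c))) := by
  rw [PySem.List.foldl_congr_mem (PySem.List.combinations rest k) (pvBodyB coalition m)
      (fun acc c => acc ++ [(m :: c, PySem.Set.diff coalition (m :: c))]) splits
      (fun acc c hc => by
        obtain ⟨hsub, -⟩ := (PySem.List.mem_combinations_iff _ _ _).mp hc
        have hcnd : c.Nodup := hrest.sublist hsub
        have hmc : ∀ x ∈ c, m < x := fun x hx => hm x (hsub.subset hx)
        have hdisj : ∀ x ∈ c, x ∉ ([m] : List Int) := fun x hx hxm => by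
          rw [List.mem_singleton] at hxm
          rw [hxm] at hx
          exact lt_irrefl m (hmc m hx)
        have hof1 : PySem.Set.ofList [m] = [m] :=
          PySem.Set.ofList_eq_self_of_nodup _ (List.nodup_singleton m)
        have hof2 : PySem.Set.ofList c = c := PySem.Set.ofList_eq_self_of_nodup _ hcnd
        have hun : PySem.Set.union [m] c = m :: c := by
          simp only [PySem.Set.union]
          rw [PySem.Set.update_eq_append_of_disjoint [m] c hcnd hdisj]
          rfl
        simp only [pvBodyB, hof1, hof2, hun]),
    PySem.List.foldl_append_singleton_eq_map]

-- range(1, r+1) indexed by size-1 walks the same blocks as range(0, r) indexed by size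
lemma pv_outer_shift {γ : Type} (F : Nat → List γ) (r : Nat) (init : List γ) :
    (PySem.List.pyRange 1 ((r : Int) + 1)).foldl (fun acc i => acc ++ F (i.toNat - 1)) init
      = (PySem.List.pyRange 0 (r : Int)).foldl (fun acc i => acc ++ F i.toNat) init := by
  induction r with
  | zero =>
      have e1 : PySem.List.pyRange 1 (((0 : Nat) : Int) + 1) = [] := by
        refine List.eq_nil_iff_forall_not_mem.mpr (fun x hx => ?_)
        rw [PySem.List.mem_pyRange_one] at hx
        omega
      have e2 : PySem.List.pyRange 0 (((0 : Nat) : Int)) = [] := by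
        refine List.eq_nil_iff_forall_not_mem.mpr (fun x hx => ?_)
        rw [PySem.List.mem_pyRange_one] at hx
        omega
      rw [e1, e2]
      rfl
  | succ r ih =>
      have c1 : (((r + 1 : Nat)) : Int) + 1 = ((r : Int) + 1) + 1 := by push_cast; ring
      have c2 : (((r + 1 : Nat)) : Int) = (r : Int) + 1 := by push_cast; ring
      rw [c1, c2,
        PySem.List.pyRange_one_succ_right (a := 1) (b := (r : Int) + 1) (by omega),
        PySem.List.pyRange_one_succ_right (a := 0) (b := (r : Int)) (by omega),
        List.foldl_append, List.foldl_append, ih]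
      simp only [List.foldl_cons, List.foldl_nil]
      have harg : ((r : Int) + 1).toNat - 1 = ((r : Int)).toNat := by omega
      rw [harg]

-- ===== VERDICT =====
theorem generate_split_spec : Claim_equal_generate_split := by
  intro coalition _ hpre
  unfold Spec_generate_split generate_split generate_split_alt
  by_cases hlen : coalition.length ≤ 1
  · simp [hlen]
  · rw [if_neg hlen, if_neg hlen]
    rcases hLs : PySem.List.sorted coalition (fun x => x) false with _ | ⟨m, rest⟩
    · rw [PySem.List.sorted_eq_nil_iff] at hLs
      subst hLs
      simp at hlen
    · have hperm : (m :: rest).Perm coalition := hLs ▸ PySem.List.sorted_perm coalition (fun x => x) false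
      have hndL : (m :: rest).Nodup := (hperm.nodup_iff).mpr hpre
      have hrest : rest.Nodup := hndL.of_cons
      have hmnotin : m ∉ rest := (List.nodup_cons.mp hndL).1
      have hpair := PySem.List.sorted_pairwise coalition (fun x => x)
      rw [hLs] at hpair
      have hm : ∀ x ∈ rest, m < x := by
        intro x hx
        have hle : m ≤ x := (List.pairwise_cons.mp hpair).1 x hx
        rcases lt_or_eq_of_le hle with h | h
        · exact h
        · exact absurd (h ▸ hx) hmnotin
      dsimp only [List.length_cons]
      rw [show ((rest.length + 1 : Nat) : Int) = (rest.length : Int) + 1 by push_cast; ring]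
      rw [PySem.List.foldl_congr_mem (PySem.List.pyRange 1 ((rest.length : Int) + 1))
          (fun splits size => (PySem.List.combinations (m :: rest) size.toNat).foldl (pvBodyA coalition) splits)
          (fun acc (i : Int) => acc ++ (PySem.List.combinations rest (i.toNat - 1)).map
            (fun c => (m :: c, PySem.Set.diff coalition (m :: c)))) []
          (fun acc x hx => by
            rw [PySem.List.mem_pyRange_one] at hx
            obtain ⟨s, hs⟩ : ∃ s, x.toNat = s + 1 := ⟨x.toNat - 1, by omega⟩
            simp only [hs, Nat.add_sub_cancel]
            exact pv_innerA coalition m rest hm hrest hperm hpre s (by omega) acc)]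
      rw [PySem.List.foldl_congr_mem (PySem.List.pyRange 0 ((rest.length : Int)))
          (fun splits k => (PySem.List.combinations rest k.toNat).foldl (pvBodyB coalition m) splits)
          (fun acc (k : Int) => acc ++ (PySem.List.combinations rest k.toNat).map
            (fun c => (m :: c, PySem.Set.diff coalition (m :: c)))) []
          (fun acc k _ => pv_innerB coalition m rest hm hrest k.toNat acc)]
      exact pv_outer_shift
        (fun s => (PySem.List.combinations rest s).map
          (fun c => (m :: c, PySem.Set.diff coalition (m :: c)))) rest.length []
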